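-- pv_equiv track=rewrite | github.com/insafkraidia/Multi-Agent-Large-Language-Model-Debate-MA-LLMD- | metrics_evaluator.py | pairwise_agreement_count
-- ===== SOURCE A (Python) =====
-- from typing import Any, Dict, List, Optional, Tuple
--
-- def pairwise_agreement_count(answers: List[Optional[str]]) -> List[int]:
--     """
--     For each agent i: how many OTHER agents match its answer.
--     """
--     n = len(answers)
--     out = [0] * n
--     for i in range(n):
--         ai = answers[i]
--         if ai is None:
--             continue
--         out[i] = sum(1 for j in range(n) if j != i and answers[j] == ai)
--     return out
-- ===== SOURCE B (Python) =====
-- def pairwise_agreement_count(answers):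
--     """
--     For each agent i: how many OTHER agents match its answer.
--     One pass builds a frequency table, so each output is count[ai] - 1.
--     """
--     cnt = {}
--     for a in answers:
--         if a is not None:
--             cnt[a] = cnt.get(a, 0) + 1
--     return [0 if a is None else cnt[a] - 1 for a in answers]
-- ===== Notes on version B (the rewrite author's own statement) =====
-- stated objective: faster
-- what changed: Replaced the per-agent inner scan over all other agents by a single frequency dictionary built in one pass, so each output is count[answer]-1.
import Mathlib
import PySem

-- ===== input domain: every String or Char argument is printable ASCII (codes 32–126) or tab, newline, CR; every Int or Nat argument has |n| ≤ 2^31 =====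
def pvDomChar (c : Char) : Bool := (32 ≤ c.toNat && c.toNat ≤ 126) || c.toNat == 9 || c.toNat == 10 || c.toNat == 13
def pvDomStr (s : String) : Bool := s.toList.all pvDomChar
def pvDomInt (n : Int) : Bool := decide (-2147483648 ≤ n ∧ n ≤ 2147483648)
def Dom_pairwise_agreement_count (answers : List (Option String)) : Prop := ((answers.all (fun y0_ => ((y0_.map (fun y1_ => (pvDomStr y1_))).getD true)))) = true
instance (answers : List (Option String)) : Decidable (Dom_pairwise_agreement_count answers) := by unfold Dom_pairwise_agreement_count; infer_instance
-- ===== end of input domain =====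

-- B replaces A's quadratic per-agent scan by one frequency dictionary pass; return value only, no mutation observable.

-- ===== PORT A =====
-- for each i in range(n): if answers[i] is None keep 0, else sum 1 over j != i with answers[j] == answers[i]
def pairwise_agreement_count (answers : List (Option String)) : List Int :=
  let n : Int := answers.length
  (PySem.List.pyRange 0 n 1).map (fun i =>
    match PySem.List.pyGetD answers i none with
    | none => 0
    | some ai =>
        (PySem.List.pyRange 0 n 1).foldl (fun acc j =>
          if j ≠ i ∧ PySem.List.pyGetD answers j none = some ai then acc + 1 else acc) 0)

-- ===== PORT B =====
-- one pass builds cnt = {answer: frequency}; output per agent is cnt[ai] - 1 (0 for None)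
def pairwise_agreement_count_alt (answers : List (Option String)) : List Int :=
  let cnt : PySem.Dict String Int :=
    answers.foldl (fun d a =>
      match a with
      | none => d
      | some s => d.insert s (d.getD s 0 + 1)) PySem.Dict.empty
  answers.map (fun a =>
    match a with
    | none => 0
    | some s => cnt.getD s 0 - 1)

-- ===== PRECONDITION & SPEC =====
def Spec_pairwise_agreement_count (answers : List (Option String)) (out : List Int) : Prop := out = pairwise_agreement_count_alt answers
instance (answers : List (Option String)) (out : List Int) : Decidable (Spec_pairwise_agreement_count answers out) := by unfold Spec_pairwise_agreement_count; infer_instance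

-- ===== CLAIM (what is proved, stated in full; the proofs are below) =====
def Claim_equal_pairwise_agreement_count : Prop := ∀ (answers : List (Option String)), Dom_pairwise_agreement_count answers → Spec_pairwise_agreement_count answers (pairwise_agreement_count answers)

-- ===== LEMMAS AND PROOFS =====

theorem cnt_fold_aux (answers : List (Option String)) (d : PySem.Dict String Int) :
    answers.foldl (fun (d : PySem.Dict String Int) a =>
      match a with
      | none => d
      | some s => d.insert s (d.getD s 0 + 1)) d
    = (answers.filterMap id).foldl (fun (d : PySem.Dict String Int) s =>
        d.insert s (d.getD s 0 + 1)) d := by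
  induction answers generalizing d with
  | nil => rfl
  | cons a as ih =>
      cases a with
      | none => simpa using ih d
      | some s => simpa using ih (d.insert s (d.getD s 0 + 1))

-- B's dictionary fold equals the Counter of the non-None answers.
theorem cnt_eq_counter (answers : List (Option String)) :
    answers.foldl (fun (d : PySem.Dict String Int) a =>
      match a with
      | none => d
      | some s => d.insert s (d.getD s 0 + 1)) PySem.Dict.empty
    = PySem.Dict.counter (answers.filterMap id) := by
  rw [← PySem.Dict.foldl_insert_getD_add_one_eq_counter]
  exact cnt_fold_aux answers PySem.Dict.empty

theorem count_filterMap_id (answers : List (Option String)) (s : String) :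
    (answers.filterMap id).count s = answers.count (some s) := by
  rw [Function.id_def]
  induction answers with
  | nil => rfl
  | cons a as ih =>
      cases a with
      | none => simpa [List.count_cons] using ih
      | some t =>
          by_cases h : t = s <;> simp [h, ih]

-- A's inner scan counts occurrences of `some s` at positions j ≠ i.
theorem inner_fold_eq (xs : List (Option String)) (i : Int) (s : String)
    (hi0 : 0 ≤ i)
    (hx : PySem.List.pyGetD xs i none = some s) :
    ∀ n : Nat, n ≤ xs.length →
      (List.range n).foldl (fun acc (j : Nat) =>
        if (j : Int) ≠ i ∧ PySem.List.pyGetD xs (j : Int) none = some s then acc + 1 else acc) (0 : Int)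
      = (((xs.take n).count (some s) : Int)) - (if i < (n : Int) then 1 else 0) := by
  intro n hn
  induction n with
  | zero =>
      simp
      omega
  | succ m ih =>
      have hm : m ≤ xs.length := Nat.le_of_succ_le hn
      have hmlt : m < xs.length := hn
      rw [List.range_succ, List.foldl_append, ih hm]
      have htake : xs.take (m + 1) = xs.take m ++ [xs[m]] := by
        rw [List.take_add_one]
        simp [List.getElem?_eq_getElem hmlt]
      rw [htake, List.count_append]
      simp only [List.foldl_cons, List.foldl_nil, List.count_singleton]
      by_cases hji : (m : Int) = i
      · -- j = i : skipped by A's filter; on the count side xs[m] = some s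
        have hx' : xs[m] = some s := by
          have := hx
          rw [← hji] at this
          rw [PySem.List.pyGetD_natCast] at this
          simpa [List.getD, List.getElem?_eq_getElem hmlt] using this
        simp [hji, hx']
      · -- j ≠ i
        have hget : PySem.List.pyGetD xs (m : Int) none = xs[m] := by
          rw [PySem.List.pyGetD_natCast]
          simp [List.getD, List.getElem?_eq_getElem hmlt]
        by_cases hv : xs[m] = some s
        · have hiord : (i < (m:Int) ∨ (m:Int) < i) := by omega
          have h1 : (i < ((m:Nat)+1 : Int)) = (i < (m : Int) ∨ i = (m:Int)) := by
            simp; constructor <;> intro h <;> omega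
          simp [hji, hget, hv]
          omega
        · simp [hji, hget, hv]
          omega

-- ===== VERDICT (by name: the statement is the Claim_ definition above) =====
theorem pairwise_agreement_count_spec : Claim_equal_pairwise_agreement_count := by
  intro answers _
  unfold Spec_pairwise_agreement_count
  show pairwise_agreement_count answers = pairwise_agreement_count_alt answers
  simp only [pairwise_agreement_count, pairwise_agreement_count_alt]
  rw [cnt_eq_counter]
  apply List.ext_getElem
  · simp [PySem.List.length_pyRange_one]
  · intro k h1 h2
    have hk : k < answers.length := by
      simpa [PySem.List.length_pyRange_one] using h1
    have hlenr : k < (PySem.List.pyRange 0 (answers.length : Int) 1).length := by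
      simpa [PySem.List.length_pyRange_one] using hk
    simp only [List.getElem_map]
    have hkel : (PySem.List.pyRange 0 (answers.length : Int) 1)[k]'hlenr = (k : Int) := by
      rw [List.getElem_eq_iff hlenr, PySem.List.pyRange_zero_natCast]
      simp [hk]
    rw [hkel]
    have hget : PySem.List.pyGetD answers (k : Int) none = answers[k] := by
      rw [PySem.List.pyGetD_natCast]
      simp [List.getD, List.getElem?_eq_getElem hk]
    rw [hget]
    cases hv : answers[k] with
    | none => rfl
    | some s =>
        simp only []
        have hx : PySem.List.pyGetD answers (k : Int) none = some s := by rw [hget, hv]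
        have := inner_fold_eq answers (k : Int) s (by positivity) hx answers.length le_rfl
        rw [PySem.List.pyRange_zero_natCast, List.foldl_map]
        rw [this]
        rw [PySem.Dict.getD_counter, count_filterMap_id]
        simp [hk]
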